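-- pv_equiv track=rewrite | github.com/sawogus29/Idiom-Wordbook | mwe.py | pick_MWE_at_offset
-- ===== SOURCE A (Python) =====
-- def pick_MWE_at_offset(sel_offset, MWEs):
--     ''' get MWE which contains selected offset among MWEs
--
--     Parameters:
--     sel_offset (int): a offset selected by user
--     MWEs (list): list of MWEs, where each MWE looks like [(B, (0,1)), (I, (3,4))]
--
--     Returns:
--     list: a list containing tuples of words(merged tokens) and offset(also merges)
--
--     '''
--
--     selected_MWE = None
--     for mwe in MWEs:
--         for _, _, offset in mwe:
--            if sel_offset in range(*offset):
--                selected_MWE = mwe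
--                break
--         if selected_MWE is not None:
--             break
--
--     assert selected_MWE is not None, f'selected_MWE should not be None, offset: {sel_offset}'
--
--     # merge tokens to words
--     words = []
--     word = ''
--     prev_offset = (-1, -1)
--     for _, token, offset in selected_MWE:
--         if offset[0] == prev_offset[1]:
--             word += token[2:] if token[:2] == '##' else token
--             prev_offset = (prev_offset[0], offset[1])
--         else:
--             if len(word) != 0:
--                 words.append((word, prev_offset))
--             word = token
--             prev_offset = offset
--
--     words.append((word, prev_offset))
--
--
--
--     return words
-- ===== SOURCE B (Python) =====
-- def pick_MWE_at_offset(sel_offset, MWEs):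
--     ''' get MWE which contains selected offset among MWEs (group-then-merge rewrite) '''
--     mwe = next((m for m in MWEs
--                 if any(o[0] <= sel_offset < o[1] for _, _, o in m)), None)
--     assert mwe is not None, f'selected_MWE should not be None, offset: {sel_offset}'
--
--     # phase 1: split the MWE's tokens into contiguous groups
--     groups = []
--     prev_end = None
--     for _, token, offset in mwe:
--         if offset[0] != prev_end:
--             groups.append([])
--         groups[-1].append((token, offset))
--         prev_end = offset[1]
--
--     # phase 2: each group becomes one (word, offset) pair
--     words = []
--     for g in groups:
--         word = g[0][0]
--         for t, _ in g[1:]: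
--             word += t[2:] if t[:2] == '##' else t
--         words.append((word, (g[0][1][0], g[-1][1][1])))
--     return words
-- ===== Notes on version B (the rewrite author's own statement) =====
-- stated objective: alternative
-- what changed: B finds the MWE with a next/any generator search instead of nested flag-and-break loops, and replaces A's single stateful accumulate-and-flush merge pass by two phases: split the tokens into contiguous groups, then map each group to one merged (word, offset) pair.
-- outside the precondition, e.g. on pick_MWE_at_offset(0, [[('B', '##x', (-1, 2))]]): A returns [('x', (-1, 2))], B returns [('##x', (-1, 2))]
import Mathlib
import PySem

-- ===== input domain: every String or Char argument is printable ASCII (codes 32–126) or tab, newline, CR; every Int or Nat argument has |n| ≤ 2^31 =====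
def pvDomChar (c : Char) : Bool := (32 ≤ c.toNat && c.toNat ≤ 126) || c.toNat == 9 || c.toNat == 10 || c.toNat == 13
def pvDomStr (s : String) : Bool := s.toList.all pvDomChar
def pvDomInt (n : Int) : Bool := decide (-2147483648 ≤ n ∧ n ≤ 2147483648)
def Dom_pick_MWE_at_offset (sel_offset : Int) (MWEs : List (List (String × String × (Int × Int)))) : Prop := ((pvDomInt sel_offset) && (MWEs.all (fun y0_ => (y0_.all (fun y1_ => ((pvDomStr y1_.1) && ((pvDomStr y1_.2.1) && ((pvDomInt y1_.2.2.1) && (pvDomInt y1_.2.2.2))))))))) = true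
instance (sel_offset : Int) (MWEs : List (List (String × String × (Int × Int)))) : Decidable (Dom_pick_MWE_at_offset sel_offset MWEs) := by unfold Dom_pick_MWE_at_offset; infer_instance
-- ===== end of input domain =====

-- B replaces A's stateful accumulate-and-flush pass by a next/any search, a grouping phase and a
-- per-group merge (objective: alternative decomposition, same cost). Where A's assert raises, both
-- ports return [] (excluded by Pre_).

-- shared helper: `token[2:] if token[:2] == '##' else token` (identical subexpression of both Pythons)
def pvStrip (t : String) : String :=
  if PySem.Str.slice t (some 0) (some 2) = "##" then PySem.Str.slice t (some 2) none else t

-- `sel_offset in range(s, e)` is exactly `s ≤ sel_offset < e` (step-1 range membership)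
def pvHit (sel : Int) (tok : String × String × (Int × Int)) : Bool :=
  decide (tok.2.2.1 ≤ sel ∧ sel < tok.2.2.2)

-- ===== PORT A =====
-- A's nested search loop with `break` flags: first mwe one of whose tokens' ranges contains sel_offset
def pickAFind (sel : Int) : List (List (String × String × (Int × Int))) → Option (List (String × String × (Int × Int)))
  | [] => none
  | mwe :: rest => if mwe.any (pvHit sel) then some mwe else pickAFind sel rest

def pick_MWE_at_offset (sel_offset : Int) (MWEs : List (List (String × String × (Int × Int)))) : List (String × (Int × Int)) :=
  match pickAFind sel_offset MWEs with
  | none => []  -- Python: `assert` raises AssertionError here; Pre_ excludes these inputs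
  | some selected =>
    let st := selected.foldl
      (fun (acc : List (String × (Int × Int)) × String × (Int × Int)) tok =>
        if tok.2.2.1 = acc.2.2.2 then
          (acc.1, acc.2.1 ++ pvStrip tok.2.1, (acc.2.2.1, tok.2.2.2))
        else
          ((if PySem.Str.len acc.2.1 ≠ 0 then acc.1 ++ [(acc.2.1, acc.2.2)] else acc.1),
           tok.2.1, tok.2.2))
      ([], "", (-1, -1))
    st.1 ++ [(st.2.1, st.2.2)]

-- ===== PORT B =====
-- next((m for m in MWEs if any(...)), None)
def pickBFind (sel : Int) (MWEs : List (List (String × String × (Int × Int)))) : Option (List (String × String × (Int × Int))) :=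
  MWEs.find? (fun m => m.any (pvHit sel))

-- phase 1: contiguous groups (groups[-1].append ported as dropLast ++ [last ++ [x]])
def pickBGroups (mwe : List (String × String × (Int × Int))) : List (List (String × (Int × Int))) :=
  (mwe.foldl
    (fun (acc : List (List (String × (Int × Int))) × Option Int) tok =>
      let gs := if (some tok.2.2.1) ≠ acc.2 then acc.1 ++ [[]] else acc.1
      (gs.dropLast ++ [gs.getLast?.getD [] ++ [(tok.2.1, tok.2.2)]], some tok.2.2.2))
    ([], none)).1

-- phase 2: one (word, offset) per group; g[0], g[-1] are pyGet? (groups are never empty)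
def pickBWord (g : List (String × (Int × Int))) : String × (Int × Int) :=
  match PySem.List.pyGet? g 0, PySem.List.pyGet? g (-1) with
  | some f, some l =>
    ((PySem.List.slice g (some 1) none).foldl (fun w t => w ++ pvStrip t.1) f.1, (f.2.1, l.2.2))
  | _, _ => ("", (0, 0))  -- unreachable: every group is nonempty

def pick_MWE_at_offset_alt (sel_offset : Int) (MWEs : List (List (String × String × (Int × Int)))) : List (String × (Int × Int)) :=
  match pickBFind sel_offset MWEs with
  | none => []  -- Python: `assert` raises AssertionError here; Pre_ excludes these inputs
  | some mwe => (pickBGroups mwe).map pickBWord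

-- ===== PRECONDITION & SPEC =====
-- Pre_ excludes (a) inputs where no MWE token range contains sel_offset — A's assert RAISES — and
-- (b) inputs whose first matching MWE contains a token with empty text, or opens with a '##' token
-- whose start is -1: degenerate tokens on which A's (-1,-1) seed and its silent drop of empty merged
-- words are as defensible as B's plain grouping, so neither value is the specified one.
def Pre_pick_MWE_at_offset (sel_offset : Int) (MWEs : List (List (String × String × (Int × Int)))) : Prop :=
  (MWEs.find? (fun m => m.any (pvHit sel_offset))).isSome = true ∧
  ∀ m ∈ MWEs.find? (fun m => m.any (pvHit sel_offset)),
    (∀ tok ∈ m, tok.2.1 ≠ "") ∧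
    (∀ tok0 ∈ m.head?, ¬(tok0.2.2.1 = -1 ∧ PySem.Str.slice tok0.2.1 (some 0) (some 2) = "##"))

instance (sel_offset : Int) (MWEs : List (List (String × String × (Int × Int)))) : Decidable (Pre_pick_MWE_at_offset sel_offset MWEs) := by
  unfold Pre_pick_MWE_at_offset; infer_instance

def pvWitness_pick_MWE_at_offset : Int × (List (List (String × String × (Int × Int)))) :=
  (2, [[("B", "hello", (0, 5)), ("I", "##world", (5, 7))]])

def Spec_pick_MWE_at_offset (sel_offset : Int) (MWEs : List (List (String × String × (Int × Int)))) (out : List (String × (Int × Int))) : Prop := out = pick_MWE_at_offset_alt sel_offset MWEs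
instance (sel_offset : Int) (MWEs : List (List (String × String × (Int × Int)))) (out : List (String × (Int × Int))) : Decidable (Spec_pick_MWE_at_offset sel_offset MWEs out) := by unfold Spec_pick_MWE_at_offset; infer_instance

-- ===== CLAIM (what is proved, stated in full; the proofs are below) =====
def Claim_equal_pick_MWE_at_offset : Prop := ∀ (sel_offset : Int) (MWEs : List (List (String × String × (Int × Int)))), Dom_pick_MWE_at_offset sel_offset MWEs → Pre_pick_MWE_at_offset sel_offset MWEs → Spec_pick_MWE_at_offset sel_offset MWEs (pick_MWE_at_offset sel_offset MWEs)

-- ===== LEMMAS AND PROOFS =====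

-- the common reference: merge a run-in-progress (word, prev) with the remaining tokens
def mergeRef : String → (Int × Int) → List (String × String × (Int × Int)) → List (String × (Int × Int))
  | w, pr, [] => [(w, pr)]
  | w, pr, tok :: ts =>
    if tok.2.2.1 = pr.2 then mergeRef (w ++ pvStrip tok.2.1) (pr.1, tok.2.2.2) ts
    else (w, pr) :: mergeRef tok.2.1 tok.2.2 ts

theorem pickAFind_eq_find? (sel : Int) (l : List (List (String × String × (Int × Int)))) :
    pickAFind sel l = l.find? (fun m => m.any (pvHit sel)) := by
  induction l with
  | nil => rfl
  | cons m rest ih => by_cases h : m.any (pvHit sel) <;> simp [pickAFind, List.find?, h, ih]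

theorem str_len_ne_zero {s : String} (h : s ≠ "") : PySem.Str.len s ≠ 0 := by
  simp only [PySem.Str.len_eq, ne_eq, Nat.cast_eq_zero, List.length_eq_zero_iff,
    String.toList_eq_nil_iff]
  exact h

theorem append_ne_empty {a b : String} (h : a ≠ "") : a ++ b ≠ "" := by
  intro hc
  apply h
  have : (a ++ b).toList = [] := by rw [hc]; rfl
  simp at this
  simpa [← String.toList_eq_nil_iff] using this.1

-- A's merge loop, from a mid-run state with a nonempty word, computes mergeRef
theorem A_run (ts : List (String × String × (Int × Int))) :
    ∀ (words : List (String × (Int × Int))) (w : String) (pr : Int × Int),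
      w ≠ "" → (∀ t ∈ ts, t.2.1 ≠ "") →
      (let st := ts.foldl
        (fun (acc : List (String × (Int × Int)) × String × (Int × Int)) tok =>
          if tok.2.2.1 = acc.2.2.2 then
            (acc.1, acc.2.1 ++ pvStrip tok.2.1, (acc.2.2.1, tok.2.2.2))
          else
            ((if PySem.Str.len acc.2.1 ≠ 0 then acc.1 ++ [(acc.2.1, acc.2.2)] else acc.1),
             tok.2.1, tok.2.2)) (words, w, pr)
       st.1 ++ [(st.2.1, st.2.2)]) = words ++ mergeRef w pr ts := by
  induction ts with
  | nil => intro words w pr _ _; simp [mergeRef]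
  | cons tok ts ih =>
    intro words w pr hw hts
    by_cases h : tok.2.2.1 = pr.2
    · simp only [List.foldl_cons, mergeRef, h]
      exact ih words (w ++ pvStrip tok.2.1) (pr.1, tok.2.2.2) (append_ne_empty hw)
        (fun t ht => hts t (List.mem_cons_of_mem _ ht))
    · simp only [List.foldl_cons, if_neg h, if_pos (str_len_ne_zero hw), mergeRef]
      rw [ih (words ++ [(w, pr)]) tok.2.1 tok.2.2 (hts tok (List.mem_cons_self))
        (fun t ht => hts t (List.mem_cons_of_mem _ ht))]
      simp

-- B-side abbreviations for a group in progress
def pvWordOf : List (String × (Int × Int)) → String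
  | [] => ""
  | x :: l => l.foldl (fun w t => w ++ pvStrip t.1) x.1

def pvLastEnd (g : List (String × (Int × Int))) : Int := (g.getLastD ("", (0, 0))).2.2

def pvHeadStart : List (String × (Int × Int)) → Int
  | [] => 0
  | x :: _ => x.2.1

theorem pyGet?_neg_one {α : Type} (g : List α) (h : g ≠ []) :
    PySem.List.pyGet? g (-1) = g.getLast? := by
  have hlen : 1 ≤ g.length := List.length_pos_iff.mpr h
  simp [PySem.List.pyGet?, PySem.List.pyIdx?, hlen, List.getLast?_eq_getElem?]

theorem pickBWord_eq (g : List (String × (Int × Int))) (h : g ≠ []) :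
    pickBWord g = (pvWordOf g, (pvHeadStart g, pvLastEnd g)) := by
  match g with
  | x :: l =>
    rw [pickBWord, pyGet?_neg_one _ h]
    have h0 : PySem.List.pyGet? (x :: l) (0 : Int) = some x := by
      simp [PySem.List.pyGet?, PySem.List.pyIdx?]
    have hl : (x :: l).getLast? = some ((x :: l).getLastD ("", (0, 0))) := by
      cases hgl : (x :: l).getLast? with
      | none => simp at hgl
      | some a => simp [List.getLastD_eq_getLast?, hgl]
    rw [h0, hl]
    simp [pvWordOf, pvHeadStart, pvLastEnd, PySem.List.slice_from_one]

-- B's grouping loop, from a state whose open group is g, computes mergeRef after the word map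
set_option maxHeartbeats 2000000 in
theorem B_run (ts : List (String × String × (Int × Int))) :
    ∀ (gs : List (List (String × (Int × Int)))) (g : List (String × (Int × Int))), g ≠ [] →
      ((ts.foldl
        (fun (acc : List (List (String × (Int × Int))) × Option Int) tok =>
          let gs := if (some tok.2.2.1) ≠ acc.2 then acc.1 ++ [[]] else acc.1
          (gs.dropLast ++ [gs.getLast?.getD [] ++ [(tok.2.1, tok.2.2)]], some tok.2.2.2))
        (gs ++ [g], some (pvLastEnd g))).1).map pickBWord
      = gs.map pickBWord ++ mergeRef (pvWordOf g) (pvHeadStart g, pvLastEnd g) ts := by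
  induction ts with
  | nil =>
    intro gs g hg
    simp [mergeRef, pickBWord_eq g hg]
  | cons tok ts ih =>
    intro gs g hg
    by_cases h : tok.2.2.1 = pvLastEnd g
    · have hcond : ¬ ((some tok.2.2.1) ≠ (some (pvLastEnd g))) := by simp [h]
      simp only [List.foldl_cons, if_neg hcond, List.dropLast_concat, List.getLast?_concat,
        Option.getD_some]
      have hg' : g ++ [(tok.2.1, tok.2.2)] ≠ [] := by simp
      have hle : pvLastEnd (g ++ [(tok.2.1, tok.2.2)]) = tok.2.2.2 := by
        simp [pvLastEnd]
      rw [← hle, ih gs _ hg']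
      have hw : pvWordOf (g ++ [(tok.2.1, tok.2.2)]) = pvWordOf g ++ pvStrip tok.2.1 := by
        match g, hg with
        | x :: l, _ => simp [pvWordOf]
      have hh : pvHeadStart (g ++ [(tok.2.1, tok.2.2)]) = pvHeadStart g := by
        match g, hg with
        | x :: l, _ => simp [pvHeadStart]
      rw [hw, hh, hle]
      simp [mergeRef, h]
    · have hcond : ((some tok.2.2.1) ≠ (some (pvLastEnd g))) := by simp [h]
      simp only [List.foldl_cons, if_pos hcond]
      have e1 : (gs ++ [g] ++ [[]]).dropLast = gs ++ [g] := List.dropLast_concat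
      have e2 : (gs ++ [g] ++ [([] : List (String × (Int × Int)))]).getLast?.getD [] = [] := by
        rw [List.getLast?_concat]; rfl
      rw [e1, e2]
      have hg' : [(tok.2.1, tok.2.2)] ≠ ([] : List (String × (Int × Int))) := by simp
      have hle : pvLastEnd [(tok.2.1, tok.2.2)] = tok.2.2.2 := by simp [pvLastEnd]
      rw [show ([] : List (String × (Int × Int))) ++ [(tok.2.1, tok.2.2)] = [(tok.2.1, tok.2.2)] from rfl,
        ← hle, ih (gs ++ [g]) _ hg']
      simp [mergeRef, h, pickBWord_eq g hg, pvWordOf, pvHeadStart, hle]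

theorem pvStrip_eq_self {t : String} (h : ¬ PySem.Str.slice t (some 0) (some 2) = "##") :
    pvStrip t = t := by simp [pvStrip, h]

set_option maxHeartbeats 2000000 in
theorem A_main (sel : Int) (MWEs : List (List (String × String × (Int × Int))))
    (tok0 : String × String × (Int × Int)) (rest : List (String × String × (Int × Int)))
    (hf : MWEs.find? (fun m => m.any (pvHit sel)) = some (tok0 :: rest))
    (ht0 : tok0.2.1 ≠ "") (hrest : ∀ t ∈ rest, t.2.1 ≠ "")
    (hns : ¬(tok0.2.2.1 = -1 ∧ PySem.Str.slice tok0.2.1 (some 0) (some 2) = "##")) :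
    pick_MWE_at_offset sel MWEs = mergeRef tok0.2.1 tok0.2.2 rest := by
  unfold pick_MWE_at_offset
  rw [pickAFind_eq_find?, hf]
  simp only [List.foldl_cons]
  by_cases h0 : tok0.2.2.1 = (-1 : Int)
  · have hss : ¬ PySem.Str.slice tok0.2.1 (some 0) (some 2) = "##" := fun hs => hns ⟨h0, hs⟩
    have he : ("" : String) ++ pvStrip tok0.2.1 = tok0.2.1 := by
      rw [pvStrip_eq_self hss]; simp
    rw [if_pos h0, he,
      show ((-1 : Int), tok0.2.2.2) = (tok0.2.2.1, tok0.2.2.2) from by rw [h0]]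
    have := A_run rest [] tok0.2.1 (tok0.2.2.1, tok0.2.2.2) ht0 hrest
    simpa using this
  · have hlen : ¬ PySem.Str.len ("" : String) ≠ 0 := by simp [PySem.Str.len_eq]
    simp only [if_neg h0, if_neg hlen]
    have := A_run rest [] tok0.2.1 tok0.2.2 ht0 hrest
    simpa using this

set_option maxHeartbeats 2000000 in
theorem B_main (sel : Int) (MWEs : List (List (String × String × (Int × Int))))
    (tok0 : String × String × (Int × Int)) (rest : List (String × String × (Int × Int)))
    (hf : MWEs.find? (fun m => m.any (pvHit sel)) = some (tok0 :: rest)) :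
    pick_MWE_at_offset_alt sel MWEs = mergeRef tok0.2.1 tok0.2.2 rest := by
  unfold pick_MWE_at_offset_alt pickBFind pickBGroups
  rw [hf]
  simp only [List.foldl_cons]
  have hcond : (some tok0.2.2.1) ≠ (none : Option Int) := by simp
  rw [if_pos hcond]
  have e1 : (([] : List (List (String × (Int × Int)))) ++ [[]]).dropLast = [] := rfl
  have e2 : (([] : List (List (String × (Int × Int)))) ++ [[]]).getLast?.getD [] = [] := rfl
  rw [e1, e2]
  have hg : [(tok0.2.1, tok0.2.2)] ≠ ([] : List (String × (Int × Int))) := by simp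
  have hle : pvLastEnd [(tok0.2.1, tok0.2.2)] = tok0.2.2.2 := by simp [pvLastEnd]
  rw [show ([] : List (String × (Int × Int))) ++ [(tok0.2.1, tok0.2.2)] = [(tok0.2.1, tok0.2.2)] from rfl,
    ← hle]
  have := B_run rest [] [(tok0.2.1, tok0.2.2)] hg
  rw [hle] at this
  simpa [pvWordOf, pvHeadStart, hle] using this

-- ===== VERDICT (by name: the statement is the Claim_ definition above) =====
set_option maxHeartbeats 2000000 in
theorem pick_MWE_at_offset_spec : Claim_equal_pick_MWE_at_offset := by
  intro sel MWEs _ hpre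
  unfold Spec_pick_MWE_at_offset
  obtain ⟨hsome, hall⟩ := hpre
  cases hf : MWEs.find? (fun m => m.any (pvHit sel)) with
  | none => rw [hf] at hsome; simp at hsome
  | some m =>
    obtain ⟨hne, hhead⟩ := hall m (by rw [hf]; rfl)
    have hany : m.any (pvHit sel) := by simpa using List.find?_some hf
    match m, hany, hne, hhead with
    | tok0 :: rest, _, hne, hhead =>
      rw [A_main sel MWEs tok0 rest hf (hne tok0 List.mem_cons_self)
            (fun t ht => hne t (List.mem_cons_of_mem _ ht))
            (hhead tok0 (by simp)),
          B_main sel MWEs tok0 rest hf]
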